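-- pv_equiv track=rewrite | github.com/muhammadhamza718/100-Days-Of-AI-Engineering-Projects | week-2/Day 8-9/src/preprocessing/polynomial_features.py | polynomial_feature_names
-- ===== SOURCE A (Python) =====
-- from itertools import combinations_with_replacement
-- from typing import List, Tuple
--
-- def polynomial_feature_names(feature_names: List[str], degree: int = 2) -> List[str]:
--     """
--     Generate names for polynomial features based on original feature names.
--
--     Args:
--         feature_names (List[str]): Names of the original features
--         degree (int): Maximum degree of polynomial features
--
--     Returns:
--         List[str]: Names for the polynomial features
--     """
--     if degree < 1:
--         raise ValueError(f"Degree must be at least 1, got {degree}")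
--
--     names = ['bias']  # Start with bias term
--
--     # Add original features (degree 1)
--     names.extend(feature_names)
--
--     # Generate higher degree terms
--     for d in range(2, degree + 1):
--         # Generate all combinations with replacement of feature indices of length d
--         for combo in combinations_with_replacement(range(len(feature_names)), d):
--             # Create name by joining the feature names with '*'
--             name_parts = [feature_names[idx] for idx in combo]
--             names.append('*'.join(name_parts))
--
--     return names
-- ===== SOURCE B (Python) =====
-- def polynomial_feature_names(feature_names, degree=2):
--     if degree < 1:
--         raise ValueError(f"Degree must be at least 1, got {degree}")
--     n = len(feature_names)
--     names = ['bias'] + list(feature_names)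
--     # level: list of (last_index, name) for the current degree's terms,
--     # each next level extends names directly, no index tuples re-enumerated
--     level = [(i, feature_names[i]) for i in range(n)]
--     for _ in range(degree - 1):
--         nxt = []
--         for j, s in level:
--             for k in range(j, n):
--                 nxt.append((k, s + '*' + feature_names[k]))
--         names.extend(name for _, name in nxt)
--         level = nxt
--     return names
-- ===== Notes on version B (the rewrite author's own statement) =====
-- stated objective: alternative
-- what changed: B drops itertools.combinations_with_replacement entirely: it keeps a level table of (last index, name) pairs and builds each degree's name strings incrementally from the previous level, instead of re-enumerating index tuples from scratch per degree and joining them.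
import Mathlib
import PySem

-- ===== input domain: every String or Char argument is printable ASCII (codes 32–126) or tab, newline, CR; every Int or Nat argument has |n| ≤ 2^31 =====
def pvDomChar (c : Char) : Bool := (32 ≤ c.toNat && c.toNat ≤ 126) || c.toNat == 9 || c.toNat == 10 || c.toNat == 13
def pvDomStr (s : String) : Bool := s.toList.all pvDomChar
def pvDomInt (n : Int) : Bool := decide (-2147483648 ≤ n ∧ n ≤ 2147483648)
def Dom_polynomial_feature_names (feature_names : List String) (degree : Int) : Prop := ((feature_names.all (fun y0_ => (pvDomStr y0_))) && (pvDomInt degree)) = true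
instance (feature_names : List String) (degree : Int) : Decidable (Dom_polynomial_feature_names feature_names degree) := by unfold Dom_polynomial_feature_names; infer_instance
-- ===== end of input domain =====

-- B replaces the per-degree itertools.combinations_with_replacement re-enumeration by an
-- incremental level table of (last index, name) pairs, extending each level's name strings
-- directly; objective: alternative decomposition (return value; A raises on degree < 1, see Pre_).

-- ===== PORT A =====
-- transliteration of itertools.combinations_with_replacement(range(n), d) in its lexicographic
-- output order: first element j from start upward, remainder a combination starting at j
def pvCwrFrom (n : Nat) : Nat → Nat → List (List Nat)
  | _, 0 => [[]]
  | start, d+1 =>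
      ((List.range n).drop start).flatMap (fun j => (pvCwrFrom n j d).map (j :: ·))

def polynomial_feature_names (feature_names : List String) (degree : Int) : List String :=
  if degree < 1 then []  -- Python A raises ValueError here; excluded by Pre_
  else
    ("bias" :: feature_names) ++
      (List.range' 2 (degree - 1).toNat).flatMap (fun d =>
        (pvCwrFrom feature_names.length 0 d).map (fun combo =>
          PySem.Str.join "*" (combo.map (fun idx => feature_names.getD idx ""))))

-- ===== PORT B =====
def pvAltStep (feature_names : List String) (level : List (Nat × String)) : List (Nat × String) :=
  level.flatMap (fun p =>
    ((List.range feature_names.length).drop p.1).map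
      (fun k => (k, p.2 ++ "*" ++ feature_names.getD k "")))

def pvAltLoop (feature_names : List String) : Nat → List (Nat × String) → List String
  | 0, _ => []
  | m+1, level =>
      let nxt := pvAltStep feature_names level
      nxt.map Prod.snd ++ pvAltLoop feature_names m nxt

def polynomial_feature_names_alt (feature_names : List String) (degree : Int) : List String :=
  if degree < 1 then []  -- Python B raises ValueError here; excluded by Pre_
  else
    ("bias" :: feature_names) ++
      pvAltLoop feature_names (degree - 1).toNat
        ((List.range feature_names.length).map (fun i => (i, feature_names.getD i "")))

-- ===== PRECONDITION & SPEC =====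
-- Pre_ excludes exactly degree < 1, where Python A (and B) raise ValueError
def Pre_polynomial_feature_names (feature_names : List String) (degree : Int) : Prop := 1 ≤ degree
instance (feature_names : List String) (degree : Int) : Decidable (Pre_polynomial_feature_names feature_names degree) := by unfold Pre_polynomial_feature_names; infer_instance

def pvWitness_polynomial_feature_names : List String × Int := (["x", "y"], 2)

def Spec_polynomial_feature_names (feature_names : List String) (degree : Int) (out : List String) : Prop := out = polynomial_feature_names_alt feature_names degree
instance (feature_names : List String) (degree : Int) (out : List String) : Decidable (Spec_polynomial_feature_names feature_names degree out) := by unfold Spec_polynomial_feature_names; infer_instance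

-- ===== CLAIM (what is proved, stated in full; the proofs are below) =====
def Claim_equal_polynomial_feature_names : Prop := ∀ (feature_names : List String) (degree : Int), Dom_polynomial_feature_names feature_names degree → Pre_polynomial_feature_names feature_names degree → Spec_polynomial_feature_names feature_names degree (polynomial_feature_names feature_names degree)

-- ===== LEMMAS AND PROOFS =====

-- last element of a combination, with default for the empty prefix
def pvLastD (c : List Nat) (s : Nat) : Nat := c.getLast?.getD s

def pvToPair (fns : List String) (c : List Nat) : Nat × String :=
  (pvLastD c 0, PySem.Str.join "*" (c.map (fun idx => fns.getD idx "")))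

theorem pvGetLastD_irrel (a : Nat) (l : List Nat) (s t : Nat) :
    (a :: l).getLast?.getD s = (a :: l).getLast?.getD t := by
  cases h : (a :: l).getLast? with
  | none => simp at h
  | some v => rfl

theorem pvLastD_cons (j : Nat) (c : List Nat) (s : Nat) : pvLastD (j :: c) s = pvLastD c j := by
  cases c with
  | nil => simp [pvLastD]
  | cons a l =>
      unfold pvLastD
      rw [List.getLast?_cons_cons]
      exact pvGetLastD_irrel a l s j

theorem pvLastD_of_ne_nil (c : List Nat) (s t : Nat) (h : c ≠ []) : pvLastD c s = pvLastD c t := by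
  cases c with
  | nil => exact absurd rfl h
  | cons a l => exact pvGetLastD_irrel a l s t

theorem pvFlatMap_single {α β : Type} (f : α → β) (l : List α) :
    l.flatMap (fun x => [f x]) = l.map f := by
  induction l <;> simp_all

theorem pvFlatMap_congr {α β : Type} {l : List α} {f g : α → List β}
    (h : ∀ a ∈ l, f a = g a) : l.flatMap f = l.flatMap g := by
  induction l with
  | nil => rfl
  | cons a t ih =>
      simp only [List.flatMap_cons]
      rw [h a (by simp), ih (fun b hb => h b (by simp [hb]))]

theorem pvCwr_ne_nil (n s d : Nat) (c : List Nat) (h : c ∈ pvCwrFrom n s (d+1)) : c ≠ [] := by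
  simp only [pvCwrFrom, List.mem_flatMap, List.mem_map] at h
  obtain ⟨j, _, c', _, rfl⟩ := h
  simp

-- first-element recursion equals last-element extension
theorem pvCwr_succ (n d : Nat) : ∀ s, pvCwrFrom n s (d+1) =
    (pvCwrFrom n s d).flatMap (fun c => ((List.range n).drop (pvLastD c s)).map (fun k => c ++ [k])) := by
  induction d with
  | zero => intro s; simp [pvCwrFrom, pvLastD, pvFlatMap_single, List.map_drop]
  | succ d ih =>
      intro s
      conv_lhs => rw [pvCwrFrom]
      conv_rhs => rw [pvCwrFrom]
      rw [List.flatMap_assoc]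
      refine pvFlatMap_congr (fun j _ => ?_)
      rw [ih j, List.map_flatMap, List.flatMap_map]
      refine pvFlatMap_congr (fun c _ => ?_)
      rw [pvLastD_cons]
      simp [List.map_map, Function.comp_def]

theorem pvStr_join_singleton (x : String) : PySem.Str.join "*" [x] = x := by
  have h : (PySem.Str.join "*" [x]).toList = x.toList := by
    simp [PySem.Str.toList_join, PySem.Chars.join_singleton]
  exact String.toList_inj.mp h

theorem pvChars_join_append (sep y : List Char) : ∀ (a : List Char) (t : List (List Char)),
    PySem.Chars.join sep ((a :: t) ++ [y]) = PySem.Chars.join sep (a :: t) ++ sep ++ y := by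
  intro a t
  induction t generalizing a with
  | nil => simp [PySem.Chars.join_cons_cons, PySem.Chars.join_singleton]
  | cons b t ih =>
      simp only [List.cons_append, PySem.Chars.join_cons_cons]
      have hb := ih b
      simp only [List.cons_append] at hb
      rw [hb]
      simp [List.append_assoc]

theorem pvStr_join_append (l : List String) (y : String) (h : l ≠ []) :
    PySem.Str.join "*" (l ++ [y]) = PySem.Str.join "*" l ++ "*" ++ y := by
  apply String.toList_inj.mp
  simp only [PySem.Str.toList_join, List.map_append, List.map_cons, List.map_nil,
    String.toList_append]
  cases l with
  | nil => exact absurd rfl h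
  | cons a t =>
      simp only [List.map_cons]
      exact pvChars_join_append "*".toList y.toList a.toList (t.map String.toList)

theorem pvToPair_append (fns : List String) (c : List Nat) (k : Nat) (h : c ≠ []) :
    pvToPair fns (c ++ [k]) = (k, (pvToPair fns c).2 ++ "*" ++ fns.getD k "") := by
  unfold pvToPair pvLastD
  rw [List.map_append]
  simp only [List.map_cons, List.map_nil, List.getLast?_concat, Option.getD_some]
  rw [pvStr_join_append _ _ (by simpa using h)]

theorem pvStep_cwr (fns : List String) (s d : Nat) :
    pvAltStep fns ((pvCwrFrom fns.length s (d+1)).map (pvToPair fns)) =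
      (pvCwrFrom fns.length s (d+2)).map (pvToPair fns) := by
  rw [pvCwr_succ fns.length (d+1) s]
  unfold pvAltStep
  rw [List.flatMap_map, List.map_flatMap]
  refine pvFlatMap_congr (fun c hc => ?_)
  have hne : c ≠ [] := pvCwr_ne_nil _ _ _ _ hc
  rw [List.map_map]
  rw [show (pvToPair fns c).1 = pvLastD c s from by
    simp only [pvToPair]
    exact pvLastD_of_ne_nil c 0 s hne]
  refine List.map_congr_left (fun k _ => ?_)
  simp [pvToPair_append fns c k hne]

theorem pvLoop_cwr (fns : List String) : ∀ (m d : Nat),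
    pvAltLoop fns m ((pvCwrFrom fns.length 0 (d+1)).map (pvToPair fns)) =
      (List.range' (d+2) m).flatMap (fun e =>
        (pvCwrFrom fns.length 0 e).map (fun combo =>
          PySem.Str.join "*" (combo.map (fun idx => fns.getD idx "")))) := by
  intro m
  induction m with
  | zero => intro d; simp [pvAltLoop]
  | succ m ih =>
      intro d
      show pvAltLoop fns (m+1) _ = _
      rw [pvAltLoop, pvStep_cwr fns 0 d]
      rw [List.range'_succ, List.flatMap_cons]
      have h2 : d + 2 + 1 = (d + 1) + 2 := by omega
      rw [h2, ← ih (d+1)]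
      refine congrArg₂ _ ?_ rfl
      rw [List.map_map]
      rfl

theorem pvBase_level (fns : List String) :
    (pvCwrFrom fns.length 0 1).map (pvToPair fns) =
      (List.range fns.length).map (fun i => (i, fns.getD i "")) := by
  have h : pvCwrFrom fns.length 0 1 = (List.range fns.length).map (fun j => [j]) := by
    simp [pvCwrFrom, pvFlatMap_single]
  rw [h, List.map_map]
  refine List.map_congr_left (fun j _ => ?_)
  simp [pvToPair, pvLastD, pvStr_join_singleton]

-- ===== VERDICT (by name: the statement is the Claim_ definition above) =====
theorem polynomial_feature_names_spec : Claim_equal_polynomial_feature_names := by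
  intro fns degree _ hpre
  unfold Spec_polynomial_feature_names polynomial_feature_names polynomial_feature_names_alt
  have hlt : ¬ degree < 1 := by exact not_lt.mpr hpre
  rw [if_neg hlt, if_neg hlt]
  rw [← pvBase_level fns, pvLoop_cwr fns ((degree - 1).toNat) 0]
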